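-- pv_equiv track=rewrite | github.com/Joaomoraesmacedo/TrabalhoArquitetura | simulador.py | calcula_caracteres
-- ===== SOURCE A (Python) =====
-- def calcula_caracteres(instrucao: str)-> str:
--     '''
--     Calcula os espaços em branco necessários para o alinhamento
--     da forma correta na Pipeline
--     '''
--     if len(instrucao) < 15:
--         falta = 15 - len(instrucao)
--         resultado = instrucao
--         if falta % 2 == 0:
--             for _ in range(falta // 2):
--                 resultado = " " + resultado
--                 resultado = resultado + " "
--         else:
--             for _ in range(falta // 2):
--                 resultado = " " + resultado
--                 resultado = resultado + " "
--             resultado = " " + resultado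
--         return resultado
--     else:
--         return instrucao
-- ===== SOURCE B (Python) =====
-- def calcula_caracteres(instrucao: str) -> str:
--     '''Closed-form padding: center to width 15, extra space on the left for odd padding.'''
--     if len(instrucao) >= 15:
--         return instrucao
--     falta = 15 - len(instrucao)
--     return " " * (falta - falta // 2) + instrucao + " " * (falta // 2)
-- ===== Notes on version B (the rewrite author's own statement) =====
-- stated objective: simpler
-- what changed: Replaces the character-at-a-time concatenation loops with closed-form arithmetic and string repetition (extra space on the left for odd padding, matching A).
import Mathlib
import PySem

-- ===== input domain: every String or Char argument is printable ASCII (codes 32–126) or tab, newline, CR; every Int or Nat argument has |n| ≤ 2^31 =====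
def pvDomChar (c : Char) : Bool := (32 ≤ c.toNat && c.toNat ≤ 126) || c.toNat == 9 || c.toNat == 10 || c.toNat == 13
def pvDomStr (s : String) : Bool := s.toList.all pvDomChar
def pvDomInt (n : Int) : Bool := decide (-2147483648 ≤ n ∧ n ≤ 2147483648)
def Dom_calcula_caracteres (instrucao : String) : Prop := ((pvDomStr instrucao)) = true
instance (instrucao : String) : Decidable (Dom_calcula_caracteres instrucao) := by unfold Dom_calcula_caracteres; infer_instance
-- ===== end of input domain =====

-- B changes only the construction: closed-form pad widths instead of A's character-at-a-time loops.
-- ===== PORT A =====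
-- A's loop: each iteration prepends one space and appends one space to the accumulator.
def pvLoopA : Nat → List Char → List Char
  | 0, s => s
  | n + 1, s => pvLoopA n ((' ' :: s) ++ [' '])

def calcula_caracteres (instrucao : String) : String :=
  if PySem.Str.len instrucao < 15 then
    let falta : Int := 15 - PySem.Str.len instrucao
    if PySem.Int.mod falta 2 == 0 then
      String.ofList (pvLoopA (PySem.Int.floordiv falta 2).toNat instrucao.toList)
    else
      String.ofList (' ' :: pvLoopA (PySem.Int.floordiv falta 2).toNat instrucao.toList)
  else instrucao

-- ===== PORT B =====
-- B: closed form — falta - falta//2 spaces on the left, falta//2 on the right.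
def calcula_caracteres_alt (instrucao : String) : String :=
  if PySem.Str.len instrucao ≥ 15 then instrucao
  else
    let falta : Int := 15 - PySem.Str.len instrucao
    String.ofList (List.replicate (falta - PySem.Int.floordiv falta 2).toNat ' '
      ++ instrucao.toList ++ List.replicate (PySem.Int.floordiv falta 2).toNat ' ')

-- ===== PRECONDITION & SPEC =====
def Spec_calcula_caracteres (instrucao : String) (out : String) : Prop := out = calcula_caracteres_alt instrucao
instance (instrucao : String) (out : String) : Decidable (Spec_calcula_caracteres instrucao out) := by unfold Spec_calcula_caracteres; infer_instance

-- ===== CLAIM (what is proved, stated in full; the proofs are below) =====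
def Claim_equal_calcula_caracteres : Prop := ∀ (instrucao : String), Dom_calcula_caracteres instrucao → Spec_calcula_caracteres instrucao (calcula_caracteres instrucao)

-- ===== LEMMAS AND PROOFS =====
lemma pvLoopA_eq (k : Nat) (s : List Char) :
    pvLoopA k s = List.replicate k ' ' ++ s ++ List.replicate k ' ' := by
  induction k generalizing s with
  | zero => simp [pvLoopA]
  | succ n ih =>
    rw [pvLoopA, ih]
    have h : ∀ y : List Char, List.replicate n ' ' ++ ' ' :: y = ' ' :: (List.replicate n ' ' ++ y) := by
      intro y
      rw [← List.singleton_append, ← List.append_assoc, ← List.replicate_succ',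
        List.replicate_succ, List.cons_append]
    simp only [List.replicate_succ, List.cons_append, List.append_assoc, List.nil_append, h]

lemma pv_div_toNat (m : Nat) (h : m < 15) :
    (PySem.Int.floordiv (15 - (m : Int)) 2).toNat = (15 - m) / 2 := by
  interval_cases m <;> decide

lemma pv_sub_div_toNat (m : Nat) (h : m < 15) :
    ((15 - (m : Int)) - PySem.Int.floordiv (15 - (m : Int)) 2).toNat = (15 - m) - (15 - m) / 2 := by
  interval_cases m <;> decide

lemma pv_mod_eq (m : Nat) (h : m < 15) :
    (PySem.Int.mod (15 - (m : Int)) 2 == 0) = ((15 - m) % 2 == 0) := by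
  interval_cases m <;> decide

-- ===== VERDICT (by name: the statement is the Claim_ definition above) =====
theorem calcula_caracteres_spec : Claim_equal_calcula_caracteres := by
  intro s _
  show calcula_caracteres s = calcula_caracteres_alt s
  unfold calcula_caracteres calcula_caracteres_alt
  simp only [PySem.Str.len_eq]
  set m := s.toList.length with hm
  by_cases h : (m : Int) < 15
  · have hm15 : m < 15 := by exact_mod_cast h
    have h' : ¬ (m : Int) ≥ 15 := by omega
    rw [if_pos h, if_neg h']
    rw [pv_mod_eq m hm15, pv_div_toNat m hm15, pv_sub_div_toNat m hm15]
    rcases Nat.even_or_odd (15 - m) with he | ho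
    · have hb : ((15 - m) % 2 == 0) = true := by simp [Nat.even_iff.mp he]
      rw [if_pos hb, pvLoopA_eq]
      have : 15 - m - (15 - m) / 2 = (15 - m) / 2 := by
        have h2 := Nat.even_iff.mp he; omega
      rw [this]
    · have h2 : (15 - m) % 2 = 1 := Nat.odd_iff.mp ho
      have hb : ((15 - m) % 2 == 0) = false := by simp [h2]
      rw [if_neg (by simp [hb]), pvLoopA_eq]
      have hl : 15 - m - (15 - m) / 2 = (15 - m) / 2 + 1 := by omega
      rw [hl]
      simp [List.replicate_succ]
  · rw [if_neg h, if_pos (by omega)]
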